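-- pv_equiv track=rewrite | github.com/APSChatbot/HerokuBot | BotFiles/get_response.py | string_manipulation
-- ===== SOURCE A (Python) =====
-- main = '<div class="bot-inbox inbox"><div class="icon"><i class="fas fa-user"></i></div><div class="msg-header"><p>'
--
-- def string_manipulation(string):
--     string = str(string)
--     last = '</p></div></div>'
--     string = string.split("<break>")
--     first = string[0]
--     string.pop(0)
--     blank = ""
--     first = main + first + last
--     for items in string:
--         item = main + items + last
--         blank += item
--     final = first + blank
--     return final
-- ===== SOURCE B (Python) =====
-- main = '<div class="bot-inbox inbox"><div class="icon"><i class="fas fa-user"></i></div><div class="msg-header"><p>'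
--
-- def string_manipulation(string):
--     string = str(string)
--     last = '</p></div></div>'
--     return main + string.replace("<break>", last + main) + last
-- ===== Notes on version B (the rewrite author's own statement) =====
-- stated objective: simpler
-- what changed: Replaces the split / pop / accumulate-in-a-loop wrapping with a single str.replace expression, using the identity that joining the split pieces with the closing-plus-opening HTML as separator equals replacing the delimiter with that separator.
import Mathlib
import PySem

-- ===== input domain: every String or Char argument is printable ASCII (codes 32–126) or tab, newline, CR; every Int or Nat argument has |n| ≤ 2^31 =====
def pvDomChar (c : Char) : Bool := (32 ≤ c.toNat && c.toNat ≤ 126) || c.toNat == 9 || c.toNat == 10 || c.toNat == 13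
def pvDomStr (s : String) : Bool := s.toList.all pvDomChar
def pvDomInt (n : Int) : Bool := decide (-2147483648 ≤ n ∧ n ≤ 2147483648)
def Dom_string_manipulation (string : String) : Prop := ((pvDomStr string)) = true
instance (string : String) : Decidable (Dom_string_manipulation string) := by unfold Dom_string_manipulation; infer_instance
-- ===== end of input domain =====

-- B collapses A's split / pop(0) / accumulating loop into one str.replace expression (objective: simpler).


-- ===== PORT A =====
-- module-level constant `main`
def pvMain : String := "<div class=\"bot-inbox inbox\"><div class=\"icon\"><i class=\"fas fa-user\"></i></div><div class=\"msg-header\"><p>"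

def string_manipulation (string : String) : String :=
  -- string = str(string) : identity on a str argument
  let last := "</p></div></div>"
  let parts := (PySem.Str.split? string "<break>").getD []
  -- first = string[0]; string.pop(0): split with a nonempty separator always
  -- returns a nonempty list, so the [] branch is an unreachable totality guard
  match parts with
  | [] => ""
  | first :: rest =>
    let first := pvMain ++ first ++ last
    let blank := rest.foldl (fun blank items => blank ++ (pvMain ++ items ++ last)) ""
    first ++ blank

-- ===== PORT B =====
def string_manipulation_alt (string : String) : String :=
  let last := "</p></div></div>"
  pvMain ++ PySem.Str.replace string "<break>" (last ++ pvMain) ++ last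

-- ===== PRECONDITION & SPEC =====
def Spec_string_manipulation (string : String) (out : String) : Prop := out = string_manipulation_alt string
instance (string : String) (out : String) : Decidable (Spec_string_manipulation string out) := by unfold Spec_string_manipulation; infer_instance

-- ===== CLAIM (what is proved, stated in full; the proofs are below) =====
def Claim_equal_string_manipulation : Prop := ∀ (string : String), Dom_string_manipulation string → Spec_string_manipulation string (string_manipulation string)

-- ===== LEMMAS AND PROOFS =====

/-- Pure (fuel-free) form of `PySem.Chars.replace.go` for a nonempty pattern. -/
def pvRep (old new : List Char) (l : List Char) : List Char :=
  match l with
  | [] => []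
  | c :: t =>
    if old.isPrefixOf (c :: t) && !old.isEmpty then
      new ++ pvRep old new (t.drop (old.length - 1))
    else
      c :: pvRep old new t
termination_by l.length
decreasing_by
  all_goals simp [List.length_drop]

/-- Pure (fuel-free) form of `PySem.Chars.splitOn.go` for a nonempty separator. -/
def pvSplit (old : List Char) (l cur : List Char) : List (List Char) :=
  match l with
  | [] => [cur.reverse]
  | c :: t =>
    if old.isPrefixOf (c :: t) && !old.isEmpty then
      cur.reverse :: pvSplit old (t.drop (old.length - 1)) []
    else
      pvSplit old t (c :: cur)
termination_by l.length
decreasing_by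
  all_goals simp [List.length_drop]

theorem pvRep_go (old new : List Char) (h : old ≠ []) :
    ∀ (fuel : Nat) (l acc : List Char), l.length ≤ fuel →
      PySem.Chars.replace.go old new fuel l acc = acc.reverse ++ pvRep old new l := by
  have hlen : 1 ≤ old.length := by
    cases old with
    | nil => exact absurd rfl h
    | cons _ _ => simp
  intro fuel
  induction fuel with
  | zero =>
    intro l acc hl
    have hnil : l = [] := List.eq_nil_of_length_eq_zero (by omega)
    subst hnil
    rw [PySem.Chars.replace.go]
    simp [pvRep]
  | succ fuel ih =>
    intro l acc hl
    cases l with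
    | nil =>
      rw [PySem.Chars.replace.go]
      · simp [pvRep]
      · omega
    | cons c t =>
      rw [PySem.Chars.replace.go]
      rw [pvRep]
      by_cases hp : old.isPrefixOf (c :: t)
      · have hdrop : List.drop old.length (c :: t) = t.drop (old.length - 1) := by
          conv_lhs => rw [show old.length = (old.length - 1) + 1 from by omega]
          rw [List.drop_succ_cons]
        have hne : ¬ old.isEmpty := by simpa using h
        have hfl : (List.drop old.length (c :: t)).length ≤ fuel := by
          simp at hl ⊢; omega
        have hft : t.length ≤ fuel := by simp at hl; omega
        simp only [hp, if_true, hne, Bool.not_false, Bool.and_true]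
        rw [ih _ _ hfl, hdrop]
        simp [List.append_assoc]
      · have hft : t.length ≤ fuel := by simp at hl; omega
        simp only [hp, Bool.false_and, Bool.false_eq_true, if_false]
        rw [ih _ _ hft]
        simp

theorem pvSplit_go (old : List Char) (h : old ≠ []) :
    ∀ (fuel : Nat) (l cur : List Char) (acc : List (List Char)), l.length ≤ fuel →
      PySem.Chars.splitOn.go old fuel l cur acc = acc.reverse ++ pvSplit old l cur := by
  have hlen : 1 ≤ old.length := by
    cases old with
    | nil => exact absurd rfl h
    | cons _ _ => simp
  intro fuel
  induction fuel with
  | zero =>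
    intro l cur acc hl
    have hnil : l = [] := List.eq_nil_of_length_eq_zero (by omega)
    subst hnil
    rw [PySem.Chars.splitOn.go]
    simp [pvSplit]
  | succ fuel ih =>
    intro l cur acc hl
    cases l with
    | nil =>
      rw [PySem.Chars.splitOn.go]
      · simp [pvSplit]
      · omega
    | cons c t =>
      rw [PySem.Chars.splitOn.go]
      rw [pvSplit]
      by_cases hp : old.isPrefixOf (c :: t)
      · have hdrop : List.drop old.length (c :: t) = t.drop (old.length - 1) := by
          conv_lhs => rw [show old.length = (old.length - 1) + 1 from by omega]
          rw [List.drop_succ_cons]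
        have hne : ¬ old.isEmpty := by simpa using h
        have hfl : (List.drop old.length (c :: t)).length ≤ fuel := by
          simp at hl ⊢; omega
        have hft : t.length ≤ fuel := by simp at hl; omega
        simp only [hp, if_true, hne, Bool.not_false, Bool.and_true]
        rw [ih _ _ _ hfl, hdrop]
        simp [List.append_assoc]
      · have hft : t.length ≤ fuel := by simp at hl; omega
        simp only [hp, Bool.false_and, Bool.false_eq_true, if_false]
        rw [ih _ _ _ hft]

theorem pvSplit_ne_nil (old l cur : List Char) : pvSplit old l cur ≠ [] := by
  fun_induction pvSplit old l cur with
  | case1 => simp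
  | case2 => simp
  | case3 _ _ _ _ ih => exact ih

theorem pvJoin_pvSplit (old new : List Char) (_h : old ≠ []) :
    ∀ (l cur : List Char),
      PySem.Chars.join new (pvSplit old l cur) = cur.reverse ++ pvRep old new l := by
  intro l cur
  fun_induction pvSplit old l cur with
  | case1 cur =>
    simp [PySem.Chars.join_singleton, pvRep]
  | case2 cur c t hcond ih =>
    rcases hq : pvSplit old (t.drop (old.length - 1)) [] with _ | ⟨b, rest⟩
    · exact absurd hq (pvSplit_ne_nil _ _ _)
    · rw [hq] at ih
      rw [PySem.Chars.join_cons_cons, ih, pvRep, if_pos hcond]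
      simp [List.append_assoc]
  | case3 cur c t hcond ih =>
    rw [ih, pvRep, if_neg hcond]
    simp

theorem pvReplace_eq (s old new : List Char) (h : old ≠ []) :
    PySem.Chars.replace s old new = pvRep old new s := by
  rw [PySem.Chars.replace]
  have hne : old.isEmpty = false := by simpa using h
  rw [hne]
  simp only [Bool.false_eq_true, if_false]
  rw [pvRep_go old new h s.length s [] le_rfl]
  simp

theorem pvSplitOn_eq (s old : List Char) (h : old ≠ []) :
    PySem.Chars.splitOn s old = pvSplit old s [] := by
  rw [PySem.Chars.splitOn]
  rw [pvSplit_go old h (s.length + 1) s [] [] (by omega)]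
  simp

theorem pvFoldl_toList (A B : String) :
    ∀ (rest : List String) (init : String),
      (rest.foldl (fun blank items => blank ++ (A ++ items ++ B)) init).toList
        = init.toList ++ (rest.map (fun i => A.toList ++ i.toList ++ B.toList)).flatten := by
  intro rest
  induction rest with
  | nil => intro init; simp
  | cons x xs ih =>
    intro init
    simp only [List.foldl_cons, ih, List.map_cons, List.flatten_cons, String.toList_append]
    simp [List.append_assoc]

theorem pvShift (L M : List Char) :
    ∀ qs : List (List Char),
      L ++ (qs.map (fun q => M ++ (q ++ L))).flatten
        = (qs.map (fun q => L ++ (M ++ q))).flatten ++ L := by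
  intro qs
  induction qs with
  | nil => simp
  | cons q qs ih =>
    simp only [List.map_cons, List.flatten_cons, List.append_assoc] at *
    rw [ih]

theorem pvJoin_flatten (new : List Char) :
    ∀ (q0 : List Char) (qs : List (List Char)),
      PySem.Chars.join new (q0 :: qs) = q0 ++ (qs.map (fun q => new ++ q)).flatten := by
  intro q0 qs
  induction qs generalizing q0 with
  | nil => simp [PySem.Chars.join_singleton]
  | cons q qs ih =>
    rw [PySem.Chars.join_cons_cons, ih]
    simp [List.append_assoc]

-- ===== VERDICT (by name: the statement is the Claim_ definition above) =====
theorem pvToList_inj (a b : String) (h : a.toList = b.toList) : a = b := by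
  have := congrArg String.ofList h
  simpa [String.ofList_toList] using this

theorem string_manipulation_spec : Claim_equal_string_manipulation := by
  intro string _
  unfold Spec_string_manipulation string_manipulation string_manipulation_alt
  have hsep : ("<break>" : String).toList ≠ [] := by decide
  have hsplit : PySem.Str.split? string "<break>"
      = some ((PySem.Chars.splitOn string.toList ("<break>" : String).toList).map String.ofList) := by
    rw [PySem.Str.split?, PySem.Chars.split?]
    rw [if_neg (by simpa using hsep)]
    rfl
  rcases hq : PySem.Chars.splitOn string.toList ("<break>" : String).toList with _ | ⟨q0, qs⟩
  · rw [pvSplitOn_eq _ _ hsep] at hq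
    exact absurd hq (pvSplit_ne_nil _ _ _)
  rw [hsplit, hq]
  simp only [Option.getD_some, List.map_cons]
  apply pvToList_inj
  rw [String.toList_append, pvFoldl_toList]
  have hkey : PySem.Chars.replace string.toList ("<break>" : String).toList
        (("</p></div></div>" : String).toList ++ pvMain.toList)
      = PySem.Chars.join (("</p></div></div>" : String).toList ++ pvMain.toList) (q0 :: qs) := by
    rw [pvReplace_eq _ _ _ hsep, ← hq, pvSplitOn_eq _ _ hsep, pvJoin_pvSplit _ _ hsep]
    simp
  rw [PySem.Str.replace]
  simp only [String.toList_append, String.toList_ofList, List.map_map]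
  rw [hkey, pvJoin_flatten]
  have hshift := pvShift ("</p></div></div>" : String).toList pvMain.toList qs
  simp only [List.append_assoc, Function.comp_def, String.toList_ofList] at *
  rw [show ("" : String).toList = [] from rfl, List.nil_append]
  rw [hshift]
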